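-- pv_equiv track=rewrite | github.com/spark8ku/DeepMPP | src/utils/sculptor.py | get_concat_target
-- ===== SOURCE A (Python) =====
-- def get_concat_target(i,concat_targets):
--     # concat_targets에서 i가 포함된 concat_target을 찾고 concat_targets에서 제거
--     # concat_target이 없으면 i를 포함하는 concat_target을 생성
--     concat_target = None
--     for _target in concat_targets.copy():
--         if i in _target:
--             if concat_target is None:
--                 concat_target = _target.copy()
--             else:
--                 concat_target = concat_target+_target
--             concat_targets.remove(_target)
--     if concat_target is None:
--         concat_target = [i]
--     return concat_target,concat_targets
-- ===== SOURCE B (Python) =====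
-- def get_concat_target(i, concat_targets):
--     # Partition first, then flatten the matches; mutate the input list in place.
--     matching = [t for t in concat_targets if i in t]
--     remaining = [t for t in concat_targets if i not in t]
--     concat_targets[:] = remaining
--     result = [x for t in matching for x in t] if matching else [i]
--     return result, concat_targets
-- ===== Notes on version B (the rewrite author's own statement) =====
-- stated objective: simpler
-- what changed: Replaces the interleaved scan-merge-remove loop (with list.remove inside the iteration) by a partition into matching/non-matching sublists followed by a single flatten, assigning the survivors back in place.
import Mathlib
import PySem

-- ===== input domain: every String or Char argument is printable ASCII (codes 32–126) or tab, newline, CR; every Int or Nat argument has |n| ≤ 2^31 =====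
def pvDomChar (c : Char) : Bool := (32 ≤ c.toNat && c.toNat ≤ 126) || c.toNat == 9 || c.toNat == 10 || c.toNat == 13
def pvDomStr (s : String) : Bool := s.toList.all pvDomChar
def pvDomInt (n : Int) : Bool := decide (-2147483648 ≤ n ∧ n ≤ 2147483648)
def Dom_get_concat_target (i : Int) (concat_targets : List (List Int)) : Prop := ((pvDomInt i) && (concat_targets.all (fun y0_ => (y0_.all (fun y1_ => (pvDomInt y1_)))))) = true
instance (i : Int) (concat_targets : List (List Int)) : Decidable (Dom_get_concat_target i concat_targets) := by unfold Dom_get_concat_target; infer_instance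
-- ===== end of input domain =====

-- B replaces A's interleaved scan-merge-remove loop by a partition (matching / remaining)
-- followed by a single flatten — simpler, one idea per pass.  Python A mutates
-- concat_targets in place; B performs the same mutation (slice assignment), and the
-- equivalence proved here is about the returned pair.

-- ===== PORT A =====
-- the for-loop over concat_targets.copy(); state = (concat_target, current concat_targets).
-- `list.remove` always succeeds here (proved via the invariant below); the `.getD cts`
-- branch is unreachable.
def pvLoopA (i : Int) : List (List Int) → Option (List Int) → List (List Int) → Option (List Int) × List (List Int)
  | [], ct, cts => (ct, cts)
  | t :: rest, ct, cts =>
      if i ∈ t then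
        pvLoopA i rest (match ct with | none => some t | some l => some (l ++ t))
          ((PySem.List.remove? cts t).getD cts)
      else pvLoopA i rest ct cts

def get_concat_target (i : Int) (concat_targets : List (List Int)) : List Int × List (List Int) :=
  match pvLoopA i concat_targets none concat_targets with
  | (ct, cts) => (ct.getD [i], cts)

-- ===== PORT B =====
def get_concat_target_alt (i : Int) (concat_targets : List (List Int)) : List Int × List (List Int) :=
  let matching := concat_targets.filter (fun t => decide (i ∈ t))
  let remaining := concat_targets.filter (fun t => !decide (i ∈ t))
  let result := if matching.isEmpty then [i] else matching.flatten
  (result, remaining)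

-- ===== PRECONDITION & SPEC =====
def Spec_get_concat_target (i : Int) (concat_targets : List (List Int)) (out : List Int × List (List Int)) : Prop := out = get_concat_target_alt i concat_targets
instance (i : Int) (concat_targets : List (List Int)) (out : List Int × List (List Int)) : Decidable (Spec_get_concat_target i concat_targets out) := by unfold Spec_get_concat_target; infer_instance

-- ===== CLAIM (what is proved, stated in full; the proofs are below) =====
def Claim_equal_get_concat_target : Prop := ∀ (i : Int) (concat_targets : List (List Int)), Dom_get_concat_target i concat_targets → Spec_get_concat_target i concat_targets (get_concat_target i concat_targets)

-- ===== LEMMAS AND PROOFS =====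

-- A's accumulator over the list of matching sublists
def pvAcc : Option (List Int) → List (List Int) → Option (List Int)
  | ct, [] => ct
  | none, m :: ms => pvAcc (some m) ms
  | some l, m :: ms => pvAcc (some (l ++ m)) ms

theorem pvAcc_some (l : List Int) (ms : List (List Int)) :
    pvAcc (some l) ms = some (l ++ ms.flatten) := by
  induction ms generalizing l with
  | nil => simp [pvAcc]
  | cons m ms ih => simp [pvAcc, ih]

theorem pvAcc_none (ms : List (List Int)) :
    pvAcc none ms = if ms.isEmpty then none else some ms.flatten := by
  cases ms with
  | nil => rfl
  | cons m ms => simp [pvAcc, pvAcc_some]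

theorem remove?_append_of_not_mem (kept rest : List (List Int)) (t : List Int)
    (h : ∀ k ∈ kept, k ≠ t) :
    PySem.List.remove? (kept ++ t :: rest) t = some (kept ++ rest) := by
  induction kept with
  | nil => simp [PySem.List.remove?_cons_self]
  | cons k kept ih =>
      have hk : k ≠ t := h k (by simp)
      rw [List.cons_append, PySem.List.remove?_cons_of_ne _ hk,
        ih (fun x hx => h x (by simp [hx]))]
      rfl

theorem pvLoopA_eq (i : Int) (xs : List (List Int)) : ∀ (kept : List (List Int)) (ct : Option (List Int)),
    (∀ k ∈ kept, i ∉ k) →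
    pvLoopA i xs ct (kept ++ xs) =
      (pvAcc ct (xs.filter (fun t => decide (i ∈ t))),
       kept ++ xs.filter (fun t => !decide (i ∈ t))) := by
  induction xs with
  | nil => intro kept ct _; simp [pvLoopA, pvAcc]
  | cons t rest ih =>
      intro kept ct hkept
      by_cases ht : i ∈ t
      · have hrm : PySem.List.remove? (kept ++ t :: rest) t = some (kept ++ rest) :=
          remove?_append_of_not_mem kept rest t
            (fun k hk hkt => hkept k hk (hkt ▸ ht))
        have := ih kept (match ct with | none => some t | some l => some (l ++ t)) hkept
        cases ct <;>
          simp [pvLoopA, ht, hrm, this, pvAcc]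
      · have := ih (kept ++ [t]) ct
          (by intro k hk; rcases List.mem_append.mp hk with h | h
              · exact hkept k h
              · simp at h; subst h; exact ht)
        simp [pvLoopA, ht] at this ⊢
        simpa using this

-- ===== VERDICT (by name: the statement is the Claim_ definition above) =====
theorem get_concat_target_spec : Claim_equal_get_concat_target := by
  intro i cts _
  unfold Spec_get_concat_target get_concat_target get_concat_target_alt
  have h := pvLoopA_eq i cts [] none (by simp)
  simp only [List.nil_append] at h
  rw [h, pvAcc_none]
  by_cases he : (cts.filter (fun t => decide (i ∈ t))).isEmpty <;> simp [he]
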